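-- pv_equiv track=rewrite | github.com/nakurahe/CS5800_Algorithms | codebase.py | findMostShops
-- ===== SOURCE A (Python) =====
-- def findMostShops(street_shops: list) -> list:
--     index_of_shops = []
--     n = len(street_shops)
--     i = 0
--     while i < n:
--         if street_shops[i] == 1:
--             index_of_shops.append(i)
--             i += 3
--         else:
--             i += 1
--
--     return index_of_shops
-- ===== SOURCE B (Python) =====
-- def findMostShops(street_shops: list) -> list:
--     ones = [i for i, v in enumerate(street_shops) if v == 1]
--     result = []
--     last = -3
--     for i in ones:
--         if i >= last + 3:
--             result.append(i)
--             last = i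
--     return result
-- ===== Notes on version B (the rewrite author's own statement) =====
-- stated objective: alternative
-- what changed: Replaced the single index-jumping while loop (i += 3 after a pick) by two passes: first collect all indices holding 1 via enumerate, then greedily filter that list keeping an index only when it is at least last_picked + 3.
import Mathlib
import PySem

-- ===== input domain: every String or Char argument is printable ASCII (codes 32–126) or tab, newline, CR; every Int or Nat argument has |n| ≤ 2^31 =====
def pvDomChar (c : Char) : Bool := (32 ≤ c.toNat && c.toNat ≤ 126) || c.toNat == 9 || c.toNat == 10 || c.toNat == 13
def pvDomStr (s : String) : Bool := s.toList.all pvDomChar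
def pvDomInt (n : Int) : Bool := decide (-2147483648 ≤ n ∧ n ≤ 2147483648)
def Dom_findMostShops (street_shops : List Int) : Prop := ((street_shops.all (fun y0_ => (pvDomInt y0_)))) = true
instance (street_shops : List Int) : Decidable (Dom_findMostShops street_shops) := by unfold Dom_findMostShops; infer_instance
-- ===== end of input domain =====

-- B changes the decomposition (collect indices of 1s, then greedy gap-3 filter); same O(n) cost.

-- ===== PORT A =====
-- the while loop: i scans upward, jumping by 3 after each pick
def findMostShopsGo (street_shops : List Int) (n : Int) (i : Int) (acc : List Int) : List Int :=
  if h : i < n then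
    if PySem.List.pyGet? street_shops i = some 1 then
      findMostShopsGo street_shops n (i + 3) (acc ++ [i])
    else
      findMostShopsGo street_shops n (i + 1) acc
  else acc
termination_by (n - i).toNat
decreasing_by all_goals omega

def findMostShops (street_shops : List Int) : List Int :=
  findMostShopsGo street_shops (street_shops.length : Int) 0 []

-- ===== PORT B =====
def findMostShops_alt (street_shops : List Int) : List Int :=
  let ones := ((PySem.List.enumerate street_shops).filter (fun p => p.2 == 1)).map (fun p => p.1)
  let r := ones.foldl
    (fun (s : Int × List Int) i => if i ≥ s.1 + 3 then (i, s.2 ++ [i]) else s)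
    ((-3 : Int), ([] : List Int))
  r.2

-- ===== PRECONDITION & SPEC =====
def Spec_findMostShops (street_shops : List Int) (out : List Int) : Prop := out = findMostShops_alt street_shops
instance (street_shops : List Int) (out : List Int) : Decidable (Spec_findMostShops street_shops out) := by unfold Spec_findMostShops; infer_instance

-- ===== CLAIM (what is proved, stated in full; the proofs are below) =====
def Claim_equal_findMostShops : Prop := ∀ (street_shops : List Int), Dom_findMostShops street_shops → Spec_findMostShops street_shops (findMostShops street_shops)

-- ===== LEMMAS AND PROOFS =====

-- the common greedy core: pick an element iff it is ≥ last + 3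
def pvGreedy : List Int → Int → List Int
  | [], _ => []
  | x :: xs, last => if x ≥ last + 3 then x :: pvGreedy xs x else pvGreedy xs last

-- indices (offset k) of the 1s in a list
def pvOnes : List Int → Int → List Int
  | [], _ => []
  | v :: vs, k => if v = 1 then k :: pvOnes vs (k + 1) else pvOnes vs (k + 1)

theorem pvOnes_ge (l : List Int) (k x : Int) (hx : x ∈ pvOnes l k) : k ≤ x := by
  induction l generalizing k with
  | nil => simp [pvOnes] at hx
  | cons v vs ih =>
    simp only [pvOnes] at hx
    split at hx
    · rcases List.mem_cons.1 hx with h | h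
      · omega
      · have := ih (k + 1) h; omega
    · have := ih (k + 1) hx; omega

theorem pvGreedy_congr (l : List Int) (l1 l2 : Int)
    (h : ∀ x ∈ l, (l1 + 3 ≤ x ↔ l2 + 3 ≤ x)) : pvGreedy l l1 = pvGreedy l l2 := by
  induction l generalizing l1 l2 with
  | nil => rfl
  | cons x xs ih =>
    have hx := h x (List.mem_cons_self)
    by_cases hc : l1 + 3 ≤ x
    · have hc2 : l2 + 3 ≤ x := hx.1 hc
      simp [pvGreedy, show x ≥ l1 + 3 from hc, show x ≥ l2 + 3 from hc2]
    · have hc2 : ¬ l2 + 3 ≤ x := fun h2 => hc (hx.2 h2)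
      simp only [pvGreedy, ge_iff_le, if_neg hc, if_neg hc2]
      exact ih l1 l2 (fun y hy => h y (List.mem_cons_of_mem _ hy))

-- dropping one leading position that is too close to last does not change the greedy result
theorem pvGreedy_ones_drop (l : List Int) (k last : Int) (hk : k < last + 3) :
    pvGreedy (pvOnes l k) last = pvGreedy (pvOnes (l.drop 1) (k + 1)) last := by
  cases l with
  | nil => rfl
  | cons v vs =>
    simp only [pvOnes, List.drop_one, List.tail_cons]
    split
    · simp [pvGreedy, show ¬ k ≥ last + 3 by omega]
    · rfl

theorem pvGo_eq (street_shops : List Int) (i : Int) (acc : List Int)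
    (h0 : 0 ≤ i) :
    findMostShopsGo street_shops (street_shops.length : Int) i acc
      = acc ++ pvGreedy (pvOnes (street_shops.drop i.toNat) i) (i - 3) := by
  generalize hm : ((street_shops.length : Int) - i).toNat = m
  induction m using Nat.strong_induction_on generalizing i acc with
  | _ m ih =>
  by_cases hlt : i < (street_shops.length : Int)
  · have hidx : i.toNat < street_shops.length := by omega
    have hdrop : street_shops.drop i.toNat
        = street_shops[i.toNat] :: street_shops.drop (i.toNat + 1) := by
      exact (List.drop_eq_getElem_cons hidx)
    have hget : PySem.List.pyGet? street_shops i = some street_shops[i.toNat] := by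
      exact PySem.List.pyGet?_eq_some_getElem street_shops h0 (by omega)
    by_cases hone : street_shops[i.toNat] = 1
    · rw [findMostShopsGo]
      rw [dif_pos hlt, if_pos (by rw [hget, hone])]
      rw [ih ((street_shops.length : Int) - (i + 3)).toNat (by omega) (i + 3) (acc ++ [i]) (by omega) rfl]
      have h1 : pvOnes (street_shops.drop i.toNat) i
          = i :: pvOnes (street_shops.drop (i.toNat + 1)) (i + 1) := by
        rw [hdrop]; simp [pvOnes, hone]
      rw [h1]
      have h2 : pvGreedy (i :: pvOnes (street_shops.drop (i.toNat + 1)) (i + 1)) (i - 3)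
          = i :: pvGreedy (pvOnes (street_shops.drop (i.toNat + 1)) (i + 1)) i := by
        simp only [pvGreedy]
        rw [if_pos (show i ≥ i - 3 + 3 by omega)]
      rw [h2]
      have e1 : pvGreedy (pvOnes (street_shops.drop (i.toNat + 1)) (i + 1)) i
          = pvGreedy (pvOnes (street_shops.drop (i.toNat + 2)) (i + 2)) i := by
        have h := pvGreedy_ones_drop (street_shops.drop (i.toNat + 1)) (i + 1) i (by omega)
        rw [List.drop_drop, show i.toNat + 1 + 1 = i.toNat + 2 by omega,
          show i + 1 + 1 = i + 2 by ring] at h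
        exact h
      have e2 : pvGreedy (pvOnes (street_shops.drop (i.toNat + 2)) (i + 2)) i
          = pvGreedy (pvOnes (street_shops.drop (i.toNat + 3)) (i + 3)) i := by
        have h := pvGreedy_ones_drop (street_shops.drop (i.toNat + 2)) (i + 2) i (by omega)
        rw [List.drop_drop, show i.toNat + 2 + 1 = i.toNat + 3 by omega,
          show i + 2 + 1 = i + 3 by ring] at h
        exact h
      have hnat : (i + 3).toNat = i.toNat + 3 := by omega
      have hlast : (i + 3) - 3 = i := by ring
      rw [e1, e2, ← hnat, ← hlast]
      simp
    · rw [findMostShopsGo]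
      rw [dif_pos hlt, if_neg (by rw [hget]; simp [hone])]
      rw [ih ((street_shops.length : Int) - (i + 1)).toNat (by omega) (i + 1) acc (by omega) rfl]
      have h1 : pvOnes (street_shops.drop i.toNat) i
          = pvOnes (street_shops.drop (i.toNat + 1)) (i + 1) := by
        rw [hdrop]; simp [pvOnes, hone]
      have hnat : (i + 1).toNat = i.toNat + 1 := by omega
      rw [hnat, h1]
      congr 1
      apply pvGreedy_congr
      intro x hx
      have hge := pvOnes_ge _ _ _ hx
      constructor <;> intro <;> omega
  · rw [findMostShopsGo, dif_neg hlt]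
    have : street_shops.drop i.toNat = [] := by
      apply List.drop_eq_nil_of_le; omega
    simp [this, pvOnes, pvGreedy]

-- B's fold computes the greedy core
theorem pvFold_eq (ones : List Int) (last : Int) (res : List Int) :
    (ones.foldl (fun (s : Int × List Int) i => if i ≥ s.1 + 3 then (i, s.2 ++ [i]) else s)
      (last, res)).2 = res ++ pvGreedy ones last := by
  induction ones generalizing last res with
  | nil => simp [pvGreedy]
  | cons x xs ih =>
    simp only [List.foldl_cons, pvGreedy]
    by_cases h : x ≥ last + 3
    · rw [if_pos h, if_pos h, ih]; simp
    · rw [if_neg h, if_neg h, ih]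

-- B's first pass computes pvOnes
theorem pvEnum_eq (l : List Int) (k : Int) :
    ((PySem.List.enumerate l k).filter (fun p => p.2 == 1)).map (fun p => p.1) = pvOnes l k := by
  induction l generalizing k with
  | nil => simp [PySem.List.enumerate_nil, pvOnes]
  | cons v vs ih =>
    rw [PySem.List.enumerate_cons]
    by_cases h : v = 1
    · simp [h, pvOnes, ih]
    · simp [h, pvOnes, ih]

-- ===== VERDICT (by name: the statement is the Claim_ definition above) =====
theorem findMostShops_spec : Claim_equal_findMostShops := by
  intro street_shops _
  unfold Spec_findMostShops findMostShops findMostShops_alt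
  rw [pvGo_eq street_shops 0 [] (by omega)]
  rw [pvFold_eq, pvEnum_eq]
  simp
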